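-- pv_equiv track=rewrite | github.com/zrefai/swap-ease-clustering-api | src/apis/openSea/getOldEvents.py | mergeBuckets
-- ===== SOURCE A (Python) =====
-- def bucketEventsByTokenId(assetEvents):
--     buckets = {}
--
--     for event in assetEvents:
--         if event["tokenId"] in buckets:
--             buckets[event["tokenId"]].append(event)
--         else:
--             buckets[event["tokenId"]] = [event]
--
--     return buckets
--
-- def mergeBuckets(currBuckets, assetEvents):
--     newBuckets = bucketEventsByTokenId(assetEvents)
--
--     for tokenId in newBuckets.keys():
--         if tokenId in currBuckets:
--             currBuckets[tokenId] += newBuckets[tokenId]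
--         else:
--             currBuckets[tokenId] = newBuckets[tokenId]
--
--     return currBuckets
-- ===== SOURCE B (Python) =====
-- def mergeBuckets(currBuckets, assetEvents):
--     for event in assetEvents:
--         currBuckets.setdefault(event["tokenId"], []).append(event)
--     return currBuckets
-- ===== Notes on version B (the rewrite author's own statement) =====
-- stated objective: simpler
-- what changed: B fuses A's two phases (build a full grouped dict, then merge it key-by-key into currBuckets) into a single pass that appends each event directly into currBuckets via setdefault, with no intermediate dict and no helper.
import Mathlib
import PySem

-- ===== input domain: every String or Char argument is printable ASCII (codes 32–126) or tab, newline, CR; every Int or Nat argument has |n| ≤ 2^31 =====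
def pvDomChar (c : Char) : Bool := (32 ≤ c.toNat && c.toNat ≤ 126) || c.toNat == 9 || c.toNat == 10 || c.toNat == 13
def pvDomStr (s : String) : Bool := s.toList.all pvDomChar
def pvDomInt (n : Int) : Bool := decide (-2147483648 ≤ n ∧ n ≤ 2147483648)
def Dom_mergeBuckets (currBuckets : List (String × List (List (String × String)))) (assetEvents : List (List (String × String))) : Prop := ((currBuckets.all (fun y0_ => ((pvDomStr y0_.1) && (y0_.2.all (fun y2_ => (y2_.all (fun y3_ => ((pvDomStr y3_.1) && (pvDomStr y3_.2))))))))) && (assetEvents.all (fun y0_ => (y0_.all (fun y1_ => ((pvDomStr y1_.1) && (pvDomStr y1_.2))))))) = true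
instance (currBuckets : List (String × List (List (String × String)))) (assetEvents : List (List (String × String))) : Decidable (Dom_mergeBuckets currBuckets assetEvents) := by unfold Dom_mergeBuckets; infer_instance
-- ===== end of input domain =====

-- B fuses A's two phases (group into a fresh dict, then merge key-by-key) into one pass that
-- appends each event directly into currBuckets (setdefault + append); equivalence is about the
-- RETURN value (both Pythons also mutate currBuckets in place, identically).

-- ===== PORT A =====
-- event["tokenId"]: Python raises KeyError when the key is missing; Pre_ excludes that, so the
-- getD default "" is never reached on admitted inputs.
def pvTok (e : List (String × String)) : String := (PySem.Dict.mk e).getD "tokenId" ""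

def bucketEventsByTokenId (assetEvents : List (List (String × String))) :
    PySem.Dict String (List (List (String × String))) :=
  assetEvents.foldl
    (fun b e =>
      if b.contains (pvTok e) then b.modify (pvTok e) [] (fun x => x ++ [e])
      else b.insert (pvTok e) [e])
    PySem.Dict.empty

def mergeBuckets (currBuckets : List (String × List (List (String × String)))) (assetEvents : List (List (String × String))) : List (String × List (List (String × String))) :=
  let newBuckets := bucketEventsByTokenId assetEvents
  (newBuckets.keys.foldl
    (fun c t =>
      if c.contains t then c.modify t [] (fun x => x ++ newBuckets.getD t [])
      else c.insert t (newBuckets.getD t []))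
    (PySem.Dict.mk currBuckets)).items

-- ===== PORT B =====
-- Source B: currBuckets.setdefault(event["tokenId"], []).append(event) is exactly
-- d[k] = d.get(k, []) + [event], i.e. Dict.modify.
def mergeBuckets_alt (currBuckets : List (String × List (List (String × String)))) (assetEvents : List (List (String × String))) : List (String × List (List (String × String))) :=
  (assetEvents.foldl
    (fun c e => c.modify (pvTok e) [] (fun x => x ++ [e]))
    (PySem.Dict.mk currBuckets)).items

-- ===== PRECONDITION & SPEC =====
-- Pre_ excludes events lacking a "tokenId" key (Python A raises KeyError there) and association
-- lists with duplicate keys, which do not represent any Python dict under the type convention.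
def Pre_mergeBuckets (currBuckets : List (String × List (List (String × String)))) (assetEvents : List (List (String × String))) : Prop :=
  (currBuckets.map Prod.fst).Nodup ∧
  (∀ p ∈ currBuckets, ∀ e ∈ p.2, (e.map Prod.fst).Nodup) ∧
  (∀ e ∈ assetEvents, (e.map Prod.fst).Nodup ∧ "tokenId" ∈ e.map Prod.fst)
instance (currBuckets : List (String × List (List (String × String)))) (assetEvents : List (List (String × String))) : Decidable (Pre_mergeBuckets currBuckets assetEvents) := by unfold Pre_mergeBuckets; infer_instance

def pvWitness_mergeBuckets : (List (String × List (List (String × String)))) × (List (List (String × String))) :=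
  ([("1", [[("tokenId", "1"), ("x", "a")]])],
   [[("tokenId", "1"), ("y", "b")], [("tokenId", "2")]])

def Spec_mergeBuckets (currBuckets : List (String × List (List (String × String)))) (assetEvents : List (List (String × String))) (out : List (String × List (List (String × String)))) : Prop := out = mergeBuckets_alt currBuckets assetEvents
instance (currBuckets : List (String × List (List (String × String)))) (assetEvents : List (List (String × String))) (out : List (String × List (List (String × String)))) : Decidable (Spec_mergeBuckets currBuckets assetEvents out) := by unfold Spec_mergeBuckets; infer_instance

-- ===== CLAIM (what is proved, stated in full; the proofs are below) =====
def Claim_equal_mergeBuckets : Prop := ∀ (currBuckets : List (String × List (List (String × String)))) (assetEvents : List (List (String × String))), Dom_mergeBuckets currBuckets assetEvents → Pre_mergeBuckets currBuckets assetEvents → Spec_mergeBuckets currBuckets assetEvents (mergeBuckets currBuckets assetEvents)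

-- ===== LEMMAS AND PROOFS =====

-- A's grouping step "if t in b: append else: insert [e]" IS Dict.modify t [] (· ++ [e]).
theorem pv_group_step_eq_modify {ν : Type} (b : PySem.Dict String (List ν)) (t : String) (e : ν) :
    (if b.contains t then b.modify t [] (fun x => x ++ [e]) else b.insert t [e])
      = b.modify t [] (fun x => x ++ [e]) := by
  by_cases h : b.contains t = true
  · simp [h]
  · simp only [Bool.not_eq_true] at h
    simp [h, PySem.Dict.modify, PySem.Dict.getD_of_not_contains _ _ h]

-- A's merging step "if t in c: c[t] += v else: c[t] = v" IS Dict.modify t [] (· ++ v).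
theorem pv_merge_step_eq_modify {ν : Type} (c : PySem.Dict String (List ν)) (t : String) (v : List ν) :
    (if c.contains t then c.modify t [] (fun x => x ++ v) else c.insert t v)
      = c.modify t [] (fun x => x ++ v) := by
  by_cases h : c.contains t = true
  · simp [h]
  · simp only [Bool.not_eq_true] at h
    simp [h, PySem.Dict.modify, PySem.Dict.getD_of_not_contains _ _ h]

-- getD through a fold of appending modifies over a Nodup key list.
theorem pv_getD_fold_merge {ν : Type} (l : List String) (v : String → List ν)
    (C : PySem.Dict String (List ν)) (j : String) (hnd : l.Nodup) :
    (l.foldl (fun c t => c.modify t [] (fun x => x ++ v t)) C).getD j []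
      = if j ∈ l then C.getD j [] ++ v j else C.getD j [] := by
  induction l generalizing C with
  | nil => simp
  | cons t l ih =>
    simp only [List.nodup_cons] at hnd
    simp only [List.foldl_cons, ih _ hnd.2, List.mem_cons]
    by_cases hj : j = t
    · subst hj
      simp [hnd.1, PySem.Dict.getD_modify_self]
    · simp [hj, PySem.Dict.getD_modify_of_ne _ _ _ hj]

-- getD of B's fused fold: old value ++ the events whose tokenId is j, in order.
theorem pv_getD_fused (es : List (List (String × String)))
    (C : PySem.Dict String (List (List (String × String)))) (j : String) :
    (es.foldl (fun c e => c.modify (pvTok e) [] (fun x => x ++ [e])) C).getD j []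
      = C.getD j [] ++ es.filter (fun e => pvTok e == j) := by
  have h := PySem.Dict.getD_foldl_modify_append (es.map (fun e => (pvTok e, e))) C j
  rw [List.foldl_map] at h
  simpa [List.filter_map, Function.comp_def, List.map_filter] using h

theorem pv_keys_fused (es : List (List (String × String)))
    (C : PySem.Dict String (List (List (String × String)))) :
    (es.foldl (fun c e => c.modify (pvTok e) [] (fun x => x ++ [e])) C).keys
      = PySem.Set.update C.keys (es.map pvTok) :=
  PySem.Dict.keys_foldl_modify_key es pvTok [] (fun _ e => fun x => x ++ [e]) C

theorem pv_group_eq_fused (es : List (List (String × String))) :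
    bucketEventsByTokenId es
      = es.foldl (fun c e => c.modify (pvTok e) [] (fun x => x ++ [e])) PySem.Dict.empty := by
  unfold bucketEventsByTokenId
  exact PySem.List.foldl_congr_mem es _ _ _ (fun b e _ => pv_group_step_eq_modify b (pvTok e) e)

theorem mergeBuckets_spec : Claim_equal_mergeBuckets := by
  intro curr es _hDom hPre
  unfold Spec_mergeBuckets mergeBuckets mergeBuckets_alt
  set C : PySem.Dict String (List (List (String × String))) := PySem.Dict.mk curr with hC
  have hCnd : C.keys.Nodup := hPre.1
  set G := bucketEventsByTokenId es with hG
  have hGfused : G = es.foldl (fun c e => c.modify (pvTok e) [] (fun x => x ++ [e])) PySem.Dict.empty :=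
    pv_group_eq_fused es
  -- G's keys: the distinct tokenIds, in first-appearance order
  have hGkeys : G.keys = PySem.Set.ofList (es.map pvTok) := by
    rw [hGfused, pv_keys_fused]
    simp [PySem.Dict.keys, PySem.Dict.empty, PySem.Set.update_nil_left]
  have hGnd : G.keys.Nodup := by rw [hGkeys]; exact PySem.Set.nodup_ofList _
  -- G's value at j: the events with tokenId j
  have hGgetD : ∀ j, G.getD j [] = es.filter (fun e => pvTok e == j) := by
    intro j
    rw [hGfused, pv_getD_fused]
    simp [PySem.Dict.getD_empty]
  -- A's merge loop, branches collapsed to modify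
  have hA : (G.keys.foldl
        (fun c t => if c.contains t then c.modify t [] (fun x => x ++ G.getD t [])
                    else c.insert t (G.getD t [])) C)
      = G.keys.foldl (fun c t => c.modify t [] (fun x => x ++ G.getD t [])) C :=
    PySem.List.foldl_congr_mem G.keys _ _ _ (fun c t _ => pv_merge_step_eq_modify c t (G.getD t []))
  show (G.keys.foldl
      (fun c t => if c.contains t then c.modify t [] (fun x => x ++ G.getD t [])
                  else c.insert t (G.getD t [])) C).items
    = (es.foldl (fun c e => c.modify (pvTok e) [] (fun x => x ++ [e])) C).items
  rw [hA]
  set A' := G.keys.foldl (fun c t => c.modify t [] (fun x => x ++ G.getD t [])) C with hA'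
  set B' := es.foldl (fun c e => c.modify (pvTok e) [] (fun x => x ++ [e])) C with hB'
  -- equal keys
  have hkeys : A'.keys = B'.keys := by
    rw [hA', hB', pv_keys_fused,
        PySem.Dict.keys_foldl_modify G.keys [] (fun _ t => fun x => x ++ G.getD t []) C, hGkeys]
    rw [PySem.Set.update_eq_append_filter C.keys (PySem.Set.ofList (es.map pvTok)),
        PySem.Set.update_eq_append_filter C.keys (es.map pvTok), PySem.Set.ofList_ofList]
  -- equal values everywhere
  have hgetD : ∀ j, A'.getD j [] = B'.getD j [] := by
    intro j
    rw [hA', hB', pv_getD_fused, pv_getD_fold_merge G.keys (fun t => G.getD t []) C j hGnd]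
    by_cases hj : j ∈ G.keys
    · simp [hj, hGgetD j]
    · have hfil : es.filter (fun e => pvTok e == j) = [] := by
        rw [List.filter_eq_nil_iff]
        intro e he hbeq
        apply hj
        rw [hGkeys, PySem.Set.mem_ofList]
        exact List.mem_map.mpr ⟨e, he, (eq_of_beq hbeq).symm ▸ rfl⟩
      simp [hj, hfil]
  -- equal nodup keys ⇒ equal items
  have hAnd : A'.keys.Nodup := by
    rw [hA']
    exact PySem.Dict.nodup_keys_foldl_modify_key G.keys (fun t => t) [] (fun _ t => fun x => x ++ G.getD t []) C hCnd
  have hBnd : B'.keys.Nodup := by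
    rw [hB']
    exact PySem.Dict.nodup_keys_foldl_modify_key es pvTok [] (fun _ e => fun x => x ++ [e]) C hCnd
  have : A' = B' := by
    apply PySem.Dict.ext
    rw [PySem.Dict.items_eq_map_keys A' hAnd [], PySem.Dict.items_eq_map_keys B' hBnd [], hkeys]
    exact List.map_congr_left (fun k _ => by rw [hgetD k])
  rw [this]
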